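-- pv_equiv track=rewrite | github.com/CRezelman/AdventOfCode | 2024/Day9.py | re_order_file_system_p1
-- ===== SOURCE A (Python) =====
-- def re_order_file_system_p1(lst: list[int | None]):
--     """Re-order list for part 1"""
--     end_index = len(lst) - 1
--
--     for i, _ in enumerate(lst):
--         if lst[i] is None:
--             while end_index > i and lst[end_index] is None:
--                 end_index -= 1
--
--             if end_index > i:
--                 lst[i], lst[end_index] = lst[end_index], None
--                 end_index -= 1
--
--     return lst
-- ===== SOURCE B (Python) =====
-- from collections import deque
--
--
-- def re_order_file_system_p1(lst: list[int | None]):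
--     """Re-order list for part 1: collect the values into a deque, then rewrite
--     the first k slots (keep-in-place from the front, fill gaps from the back)
--     and null the tail.  Same in-place mutation and same returned object as A."""
--     dq = deque(v for v in lst if v is not None)
--     k = len(dq)
--     for i in range(k):
--         if lst[i] is not None:
--             lst[i] = dq.popleft()
--         else:
--             lst[i] = dq.pop()
--     for i in range(k, len(lst)):
--         lst[i] = None
--     return lst
-- ===== Notes on version B (the rewrite author's own statement) =====
-- stated objective: alternative
-- what changed: A compacts with a single scan holding a shrinking right pointer that lazily skips trailing Nones and swaps each gap with the rightmost value; B first collects all values into a deque, then redistributes them in a second pass (popleft for kept slots, pop-from-back for gaps) and nulls the tail wholesale - no right pointer, no in-scan search.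
import Mathlib
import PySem

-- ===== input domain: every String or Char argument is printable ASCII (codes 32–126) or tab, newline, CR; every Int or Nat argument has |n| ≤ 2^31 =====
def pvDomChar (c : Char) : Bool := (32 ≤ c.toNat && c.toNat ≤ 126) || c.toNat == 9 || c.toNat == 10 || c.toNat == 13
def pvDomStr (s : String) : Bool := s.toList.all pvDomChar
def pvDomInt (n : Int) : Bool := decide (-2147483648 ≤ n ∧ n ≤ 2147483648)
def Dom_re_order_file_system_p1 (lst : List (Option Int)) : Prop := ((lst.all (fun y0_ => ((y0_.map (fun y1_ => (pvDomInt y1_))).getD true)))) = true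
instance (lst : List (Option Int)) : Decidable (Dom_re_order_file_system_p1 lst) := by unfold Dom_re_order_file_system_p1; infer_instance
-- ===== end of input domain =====

-- B replaces A's shrinking-right-pointer scan by a collect-then-redistribute two-pass (deque);
-- both Pythons mutate lst in place and return the same object, the theorem is about the returned value.

-- ===== PORT A =====
-- the inner `while end_index > i and lst[end_index] is None: end_index -= 1`
def pvSkip (a : List (Option Int)) (i : Int) (e : Int) : Int :=
  if e > i ∧ PySem.List.pyGetD a e none = none then pvSkip a i (e - 1) else e
termination_by (e - i).toNat
decreasing_by omega

-- one iteration of the `for i, _ in enumerate(lst)` body; state = (lst, end_index)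
def pvStep (st : List (Option Int) × Int) (i : Int) : List (Option Int) × Int :=
  if PySem.List.pyGetD st.1 i none = none then
    let e' := pvSkip st.1 i st.2
    if e' > i then
      (PySem.List.pySetD (PySem.List.pySetD st.1 i (PySem.List.pyGetD st.1 e' none)) e' none, e' - 1)
    else (st.1, e')
  else st

def re_order_file_system_p1 (lst : List (Option Int)) : List (Option Int) :=
  ((PySem.List.enumerate lst 0).foldl (fun st p => pvStep st p.1) (lst, (lst.length : Int) - 1)).1

-- ===== PORT B =====
-- the `for i in range(k)` loop of Source B: first list = the (original) prefix being rewritten,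
-- second list = the deque (popleft = head, pop = getLast/dropLast)
def pvFill : List (Option Int) → List Int → List (Option Int)
  | _, [] => []
  | [], _ :: _ => []
  | some _ :: xs, q :: qs => some q :: pvFill xs qs
  | none :: xs, q :: qs => some ((q :: qs).getLast (by simp)) :: pvFill xs (q :: qs).dropLast

def re_order_file_system_p1_alt (lst : List (Option Int)) : List (Option Int) :=
  let dq := lst.filterMap id
  pvFill lst dq ++ List.replicate (lst.length - dq.length) none

-- ===== PRECONDITION & SPEC =====
def Spec_re_order_file_system_p1 (lst : List (Option Int)) (out : List (Option Int)) : Prop := out = re_order_file_system_p1_alt lst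
instance (lst : List (Option Int)) (out : List (Option Int)) : Decidable (Spec_re_order_file_system_p1 lst out) := by unfold Spec_re_order_file_system_p1; infer_instance

-- ===== CLAIM (what is proved, stated in full; the proofs are below) =====
def Claim_equal_re_order_file_system_p1 : Prop := ∀ (lst : List (Option Int)), Dom_re_order_file_system_p1 lst → Spec_re_order_file_system_p1 lst (re_order_file_system_p1 lst)

-- ===== LEMMAS AND PROOFS =====

-- `keepFront c xs` = xs with all but its first c non-None entries nulled:
-- the shape of A's unprocessed suffix after some back values have been moved out.
def keepFront : Nat → List (Option Int) → List (Option Int)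
  | _, [] => []
  | c, none :: t => none :: keepFront c t
  | 0, some _ :: t => none :: keepFront 0 t
  | c + 1, some v :: t => some v :: keepFront c t

lemma keepFront_length (c : Nat) (xs : List (Option Int)) : (keepFront c xs).length = xs.length := by
  induction xs generalizing c with
  | nil => simp [keepFront]
  | cons x t ih =>
    cases x with
    | none => simp [keepFront, ih]
    | some v => cases c <;> simp [keepFront, ih]

lemma keepFront_zero (xs : List (Option Int)) : keepFront 0 xs = List.replicate xs.length none := by
  induction xs with
  | nil => simp [keepFront]
  | cons x t ih => cases x <;> simp [keepFront, ih, List.replicate_succ]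

lemma keepFront_all (c : Nat) (xs : List (Option Int)) (h : (xs.filterMap id).length ≤ c) :
    keepFront c xs = xs := by
  induction xs generalizing c with
  | nil => simp [keepFront]
  | cons x t ih =>
    cases x with
    | none => simpa [keepFront] using ih c (by simpa using h)
    | some v =>
      cases c with
      | zero => simp at h
      | succ c' => simp only [keepFront]; rw [ih c' (by simpa using h)]

-- decomposition of keepFront (c+1): position p of its last surviving value v
lemma keepFront_decomp (xs : List (Option Int)) (c : Nat) (h : c < (xs.filterMap id).length) :
    ∃ p v, p < xs.length ∧ (keepFront (c + 1) xs).getD p none = some v ∧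
      (∀ j, p < j → (keepFront (c + 1) xs).getD j none = none) ∧
      (keepFront (c + 1) xs).set p none = keepFront c xs ∧
      ((xs.filterMap id).take (c + 1)).getLast? = some v := by
  induction xs generalizing c with
  | nil => simp at h
  | cons x t ih =>
    cases x with
    | none =>
      obtain ⟨p, v, h1, h2, h3, h4, h5⟩ := ih c (by simpa using h)
      refine ⟨p + 1, v, by simpa using h1, by simpa [keepFront] using h2, ?_, ?_, by simpa using h5⟩
      · intro j hj
        cases j with
        | zero => omega
        | succ j' => simpa [keepFront] using h3 j' (by omega)
      · simp [keepFront, h4]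
    | some v =>
      cases c with
      | zero =>
        refine ⟨0, v, by simp, by simp [keepFront], ?_, ?_, by simp⟩
        · intro j hj
          cases j with
          | zero => omega
          | succ j' =>
            simp only [keepFront]
            have := keepFront_zero t
            simp [this, List.getD]
        · simp [keepFront]
      | succ c' =>
        obtain ⟨p, v', h1, h2, h3, h4, h5⟩ := ih c' (by simpa using h)
        refine ⟨p + 1, v', by simpa using h1, by simpa [keepFront] using h2, ?_, ?_, ?_⟩
        · intro j hj
          cases j with
          | zero => omega
          | succ j' => simpa [keepFront] using h3 j' (by omega)
        · simp [keepFront, h4]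
        · have hlt : c' < (t.filterMap id).length := by simpa using h
          have hne : (t.filterMap id).take (c' + 1) ≠ [] :=
            List.ne_nil_of_length_pos (by rw [List.length_take]; omega)
          have e1 : (some v :: t).filterMap id = v :: t.filterMap id := by simp
          have e2 : (v :: (t.filterMap id).take (c' + 1)).getLast? = ((t.filterMap id).take (c' + 1)).getLast? := by
            cases hl : (t.filterMap id).take (c' + 1) with
            | nil => exact absurd hl hne
            | cons y ys => simp
          show (((some v :: t).filterMap id).take (c' + 1 + 1)).getLast? = some v'
          rw [e1, List.take_succ_cons, e2]
          exact h5

-- pvSkip facts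
lemma pvSkip_le (a : List (Option Int)) (i e : Int) : pvSkip a i e ≤ e := by
  fun_induction pvSkip a i e with
  | case1 e h ih => omega
  | case2 e h => omega

lemma pvSkip_finds (a : List (Option Int)) (i e r : Int)
    (hir : i < r) (hre : r ≤ e)
    (hr : PySem.List.pyGetD a r none ≠ none)
    (hnone : ∀ j : Int, r < j → j ≤ e → PySem.List.pyGetD a j none = none) :
    pvSkip a i e = r := by
  fun_induction pvSkip a i e with
  | case1 e h ih =>
    rcases eq_or_lt_of_le hre with he | he
    · exact absurd h.2 (he ▸ hr)
    · exact ih (by omega) (fun j h1 h2 => hnone j h1 (by omega))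
  | case2 e h =>
    rcases eq_or_lt_of_le hre with he | he
    · omega
    · exact absurd ⟨by omega, hnone e he le_rfl⟩ h

lemma pvSkip_stuck (a : List (Option Int)) (i e : Int)
    (hnone : ∀ j : Int, i < j → j ≤ e → PySem.List.pyGetD a j none = none) :
    pvSkip a i e ≤ i := by
  fun_induction pvSkip a i e with
  | case1 e h ih => exact ih (fun j h1 h2 => hnone j h1 (by omega))
  | case2 e h =>
    by_contra hc
    exact h ⟨by omega, hnone e (by omega) le_rfl⟩

-- ===== the main loop invariant =====

-- phase 2: all positions ≥ i are none, so the state list never changes again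
lemma phase2 (T : List (Option Int)) :
    ∀ cnt (i : Nat) (e : Int), e < T.length →
      (∀ j : Nat, i ≤ j → T.getD j none = none) →
      ((List.range' i cnt).foldl (fun st (j : Nat) => pvStep st (j : Int)) (T, e)).1 = T := by
  intro cnt
  induction cnt with
  | zero => intro i e _ _; simp
  | succ m ih =>
    intro i e he hnone
    rw [List.range'_succ]
    simp only [List.foldl_cons]
    have hstep : pvStep (T, e) (i : Int) = (T, pvSkip T (i : Int) e) := by
      have hTi : PySem.List.pyGetD T (i : Int) none = none := by
        rw [PySem.List.pyGetD_natCast]; exact hnone i le_rfl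
      have hle : pvSkip T (i : Int) e ≤ (i : Int) := by
        apply pvSkip_stuck
        intro j h1 h2
        have hj0 : 0 ≤ j := by omega
        have hj : j = ((j.toNat : Nat) : Int) := (Int.toNat_of_nonneg hj0).symm
        rw [hj, PySem.List.pyGetD_natCast]
        apply hnone; omega
      simp [pvStep, hTi, if_neg (by omega : ¬ pvSkip T (i : Int) e > (i : Int))]
    rw [hstep]
    exact ih (i + 1) _ (lt_of_le_of_lt (pvSkip_le T _ e) he) (fun j hj => hnone j (by omega))

lemma pvFill_none_cons (u : List (Option Int)) (q : Int) (qs : List Int) (w : Int)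
    (hw : (q :: qs).getLast? = some w) :
    pvFill (none :: u) (q :: qs) = some w :: pvFill u (q :: qs).dropLast := by
  have h1 : (q :: qs).getLast (by simp) = w := by
    rw [List.getLast?_eq_some_getLast (by simp)] at hw
    exact Option.some.inj hw
  rw [pvFill, h1]

lemma pvFill_some_cons (u : List (Option Int)) (v q : Int) (qs : List Int) :
    pvFill (some v :: u) (q :: qs) = some q :: pvFill u qs := rfl

-- phase 1 invariant: i slots already rewritten (F), suffix = keepFront of the original,
-- e covers every surviving value, and F extends to B's full result.
lemma phase1 (lst : List (Option Int)) :
    ∀ d (i : Nat) (a : List (Option Int)) (e : Int) (F : List (Option Int)),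
      i + d = (lst.filterMap id).length →
      F.length = i →
      a = F ++ keepFront ((lst.filterMap id).length - i) (lst.drop i) →
      pvFill lst (lst.filterMap id) =
        F ++ pvFill (lst.drop i) (((lst.drop i).filterMap id).take ((lst.filterMap id).length - i)) →
      e < lst.length →
      (∀ j : Int, (i : Int) ≤ j → e < j → PySem.List.pyGetD a j none = none) →
      ((List.range' i (lst.length - i)).foldl (fun st (j : Nat) => pvStep st (j : Int)) (a, e)).1 =
        pvFill lst (lst.filterMap id) ++ List.replicate (lst.length - (lst.filterMap id).length) none := by
  intro d
  induction d with
  | zero =>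
    intro i a e F hd hF ha hfill he hcov
    have hkn : (lst.filterMap id).length ≤ lst.length := List.length_filterMap_le _ _
    have htake0 : (((lst.drop i).filterMap id).take ((lst.filterMap id).length - i)) = [] := by
      have h00 : (lst.filterMap id).length - i = 0 := by omega
      rw [h00, List.take_zero]
    have hF2 : F = pvFill lst (lst.filterMap id) := by
      rw [hfill, htake0]
      simp [pvFill]
    have haT : a = pvFill lst (lst.filterMap id) ++ List.replicate (lst.length - (lst.filterMap id).length) none := by
      rw [ha, hF2]
      have h0 : (lst.filterMap id).length - i = 0 := by omega
      rw [h0, keepFront_zero, List.length_drop]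
      have h1 : lst.length - i = lst.length - (lst.filterMap id).length := by omega
      rw [h1]
    rw [haT]
    apply phase2
    · have hlen : (pvFill lst (lst.filterMap id) ++ List.replicate (lst.length - (lst.filterMap id).length) none).length = lst.length := by
        have := congrArg List.length haT
        have halen : a.length = lst.length := by
          rw [ha]
          simp [keepFront_length, hF]
          omega
        omega
      rw [hlen]; exact he
    · intro j hj
      rw [← haT, ← hF2] at *
      rw [ha, List.getD_append_right _ _ _ _ (by omega), hF]
      have h0 : (lst.filterMap id).length - i = 0 := by omega
      rw [h0, keepFront_zero, List.getD_eq_getElem?_getD, List.getElem?_replicate]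
      split <;> rfl
  | succ m ih =>
    intro i a e F hd hF ha hfill he hcov
    have hkn : (lst.filterMap id).length ≤ lst.length := List.length_filterMap_le _ _
    have hin : i < lst.length := by omega
    have hx : lst.drop i = lst[i] :: lst.drop (i + 1) := List.drop_eq_getElem_cons hin
    have h0 : (lst.take i ++ lst.drop i).filterMap id = (lst.take i).filterMap id ++ (lst.drop i).filterMap id :=
      List.filterMap_append
    rw [List.take_append_drop] at h0
    have hEq : ((lst.take i).filterMap id).length + ((lst.drop i).filterMap id).length = (lst.filterMap id).length := by
      rw [h0]; simp
    have htk : ((lst.take i).filterMap id).length ≤ i := by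
      have := List.length_filterMap_le id (lst.take i)
      have h2 : (lst.take i).length ≤ i := by rw [List.length_take]; omega
      omega
    have hge : (lst.filterMap id).length - i ≤ ((lst.drop i).filterMap id).length := by omega
    have hck : ((lst.filterMap id).length - (i + 1)) + 1 = (lst.filterMap id).length - i := by omega
    have hni : lst.length - i = (lst.length - (i + 1)) + 1 := by omega
    rw [hni, List.range'_succ]
    simp only [List.foldl_cons]
    cases hv : lst[i] with
    | some v =>
      have hrear : keepFront ((lst.filterMap id).length - i) (lst.drop i) =
          some v :: keepFront ((lst.filterMap id).length - (i + 1)) (lst.drop (i + 1)) := by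
        rw [hx, hv, ← hck]; simp [keepFront]
      have haget : PySem.List.pyGetD a (i : Int) none = some v := by
        rw [PySem.List.pyGetD_natCast, ha, List.getD_append_right _ _ _ _ (by omega), hF, hrear]
        simp
      have hstep : pvStep (a, e) (i : Int) = (a, e) := by
        simp [pvStep, haget]
      rw [hstep]
      have hcast : ((i : Int) + 1) = ((i + 1 : Nat) : Int) := by push_cast; ring
      apply ih (i + 1) a e (F ++ [some v]) (by omega) (by simp [hF]) ?_ ?_ he ?_
      · rw [ha, hrear]; simp
      · have hfm : (lst.drop i).filterMap id = v :: (lst.drop (i + 1)).filterMap id := by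
          rw [hx, hv]; simp
        rw [hfill, hfm, ← hck, List.take_succ_cons, hx, hv, pvFill_some_cons]
        simp
      · intro j h1 h2
        exact hcov j (by push_cast at h1 ⊢; omega) h2
    | none =>
      obtain ⟨p, v, hp, hgetp, htail, hset, hlast⟩ :=
        keepFront_decomp (lst.drop i) ((lst.filterMap id).length - (i + 1)) (by omega)
      rw [hck] at hgetp htail hset hlast
      have hrear0 : keepFront ((lst.filterMap id).length - i) (lst.drop i) =
          none :: keepFront ((lst.filterMap id).length - i) (lst.drop (i + 1)) := by
        rw [hx, hv]; simp [keepFront]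
      have hp0 : 0 < p := by
        rcases Nat.eq_zero_or_pos p with h00 | h; swap
        · exact h
        · exfalso
          rw [h00, hrear0, List.getD_cons_zero] at hgetp
          simp at hgetp
      have hpn : p < lst.length - i := by
        have := hp; simpa using this
      have hagetn : ∀ j : Nat, i ≤ j →
          a.getD j none = (keepFront ((lst.filterMap id).length - i) (lst.drop i)).getD (j - i) none := by
        intro j hj
        rw [ha, List.getD_append_right _ _ _ _ (by omega), hF]
      have haget : PySem.List.pyGetD a (i : Int) none = none := by
        rw [PySem.List.pyGetD_natCast, hagetn i le_rfl, show i - i = 0 by omega, hrear0,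
          List.getD_cons_zero]
      have hrv : PySem.List.pyGetD a ((i + p : Nat) : Int) none = some v := by
        rw [PySem.List.pyGetD_natCast, hagetn _ (by omega)]
        simpa using hgetp
      have hre : ((i + p : Nat) : Int) ≤ e := by
        by_contra hlt
        have := hcov ((i + p : Nat) : Int) (by push_cast; omega) (by omega)
        rw [hrv] at this
        simp at this
      have hscan : ∀ j : Int, ((i + p : Nat) : Int) < j → j ≤ e → PySem.List.pyGetD a j none = none := by
        intro j h1 h2
        have hj0 : 0 ≤ j := by push_cast at h1; omega
        have hjc : j = ((j.toNat : Nat) : Int) := (Int.toNat_of_nonneg hj0).symm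
        rw [hjc, PySem.List.pyGetD_natCast, hagetn j.toNat (by push_cast at h1; omega)]
        apply htail
        push_cast at h1
        omega
      have hskip : pvSkip a (i : Int) e = ((i + p : Nat) : Int) :=
        pvSkip_finds _ _ _ _ (by push_cast; omega) hre (by rw [hrv]; simp) hscan
      have hgt : ((i + p : Nat) : Int) > (i : Int) := by push_cast; omega
      have hstep : pvStep (a, e) (i : Int) =
          ((a.set i (some v)).set (i + p) none, ((i + p : Nat) : Int) - 1) := by
        show (if PySem.List.pyGetD a (i : Int) none = none then
                let e' := pvSkip a (i : Int) e
                if e' > (i : Int) then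
                  (PySem.List.pySetD (PySem.List.pySetD a (i : Int) (PySem.List.pyGetD a e' none)) e' none, e' - 1)
                else (a, e')
              else (a, e)) = _
        rw [if_pos haget]
        simp only [hskip]
        rw [if_pos hgt, hrv]
        simp
        rw [show ((i : Int) + (p : Int)) = ((i + p : Nat) : Int) by push_cast; ring,
          PySem.List.pySetD_natCast]
      rw [hstep]
      -- the deque view of this step
      have hfm : (lst.drop i).filterMap id = (lst.drop (i + 1)).filterMap id := by
        rw [hx, hv]; simp
      rcases hdq : ((lst.drop i).filterMap id).take ((lst.filterMap id).length - i) with _ | ⟨q, qs⟩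
      · exfalso
        have := congrArg List.length hdq
        rw [List.length_take] at this
        simp only [List.length_nil] at this
        omega
      have hgl : (q :: qs).getLast? = some v := by
        rw [← hdq]; exact hlast
      have hdl : (q :: qs).dropLast = ((lst.drop (i + 1)).filterMap id).take ((lst.filterMap id).length - (i + 1)) := by
        have hge' : (lst.filterMap id).length - i ≤ ((lst.drop (i + 1)).filterMap id).length := by
          rw [← hfm]; exact hge
        rw [← hdq, List.dropLast_eq_take, List.length_take, List.take_take, hfm]
        congr 1
        omega
      have hsetR : (keepFront ((lst.filterMap id).length - i) (lst.drop (i + 1))).set (p - 1) none =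
          keepFront ((lst.filterMap id).length - (i + 1)) (lst.drop (i + 1)) := by
        have h1 := hset
        rw [hrear0] at h1
        have h2 : keepFront ((lst.filterMap id).length - (i + 1)) (lst.drop i) =
            none :: keepFront ((lst.filterMap id).length - (i + 1)) (lst.drop (i + 1)) := by
          rw [hx, hv]; simp [keepFront]
        rw [h2, show p = (p - 1) + 1 by omega, List.set_cons_succ] at h1
        exact (List.cons.injEq _ _ _ _).mp h1 |>.2
      apply ih (i + 1) _ _ (F ++ [some v]) (by omega) (by simp [hF]) ?_ ?_ ?_ ?_
      · -- new list shape
        rw [ha, hrear0, List.set_append_right _ _ (by omega), hF]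
        rw [show i - i = 0 by omega, List.set_cons_zero]
        rw [List.set_append_right _ _ (by omega), hF]
        rw [show i + p - i = (p - 1) + 1 by omega, List.set_cons_succ, hsetR]
        simp
      · rw [hfill, hdq, hx, hv, pvFill_none_cons _ _ _ _ hgl, hdl]
        simp
      · push_cast
        omega
      · intro j h1 h2
        have hj0 : 0 ≤ j := by push_cast at h1; omega
        have hjc : j = ((j.toNat : Nat) : Int) := (Int.toNat_of_nonneg hj0).symm
        have hjp : i + p ≤ j.toNat := by push_cast at h2; omega
        rw [hjc, PySem.List.pyGetD_natCast, List.getD_eq_getElem?_getD]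
        rcases Nat.eq_or_lt_of_le hjp with heq | hlt
        · rw [← heq]
          rw [List.getElem?_set_self]
          · rfl
          · rw [List.length_set, ha]
            simp [keepFront_length, hF]
            omega
        · rw [List.getElem?_set_ne (by omega), List.getElem?_set_ne (by omega)]
          rw [← List.getD_eq_getElem?_getD, hagetn j.toNat (by omega)]
          apply htail
          omega

-- ===== VERDICT (by name: the statement is the Claim_ definition above) =====
theorem re_order_file_system_p1_spec : Claim_equal_re_order_file_system_p1 := by
  intro lst _
  unfold Spec_re_order_file_system_p1 re_order_file_system_p1 re_order_file_system_p1_alt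
  have h1 : ((PySem.List.enumerate lst 0).foldl (fun st p => pvStep st p.1) (lst, (lst.length : Int) - 1))
      = ((List.range' 0 lst.length).foldl (fun st (j : Nat) => pvStep st (j : Int)) (lst, (lst.length : Int) - 1)) := by
    rw [← List.foldl_map (f := fun p : Int × Option Int => p.1) (g := pvStep),
      PySem.List.map_fst_enumerate, PySem.List.pyRange_one, List.foldl_map]
    simp [List.range_eq_range']
  rw [h1]
  have h2 : lst.length = lst.length - 0 := rfl
  rw [h2]
  apply phase1 lst ((lst.filterMap id).length) 0 lst ((lst.length : Int) - 1) []
  · omega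
  · rfl
  · rw [List.drop_zero, List.nil_append, Nat.sub_zero, keepFront_all _ _ le_rfl]
  · rw [List.drop_zero, List.nil_append, Nat.sub_zero, List.take_length]
  · omega
  · intro j h1 h2
    have hj0 : 0 ≤ j := h1
    have hjc : j = ((j.toNat : Nat) : Int) := (Int.toNat_of_nonneg hj0).symm
    rw [hjc, PySem.List.pyGetD_natCast]
    apply List.getD_eq_default
    omega
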